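-- pv_equiv track=rewrite | github.com/piedro404/resolucoes-de-problemas | Uri/Strings/Telefone Sem Fio.py | telefone_sem_fio
-- ===== SOURCE A (Python) =====
-- def telefone_sem_fio(frase, resps):
--     placar = [0, 0]
--     desempate = [True, True]
--     for x in range(len(frase)):
--         if frase[x] == resps[0][x]:
--             placar[0] += 1
--         if frase[x] == resps[1][x]:
--             placar[1] += 1
--         if desempate[0] == desempate[1]:
--             if placar[0] > placar[1]:
--                 desempate[1] = False
--             elif placar[0] < placar[1]:
--                 desempate[0] = False
--
--
--     if placar[0] == placar[1]:
--         if desempate[0] == desempate[1]: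
--             return "empate"
--
--         if desempate[0]:
--             return "time 1"
--
--         return "time 2"
--
--     if placar[0] > placar[1]:
--         return "time 1"
--
--     return "time 2"
-- ===== SOURCE B (Python) =====
-- def telefone_sem_fio(frase, resps):
--     s0 = [frase[x] == resps[0][x] for x in range(len(frase))]
--     s1 = [frase[x] == resps[1][x] for x in range(len(frase))]
--     p0, p1 = sum(s0), sum(s1)
--     if p0 != p1:
--         return "time 1" if p0 > p1 else "time 2"
--     for a, b in zip(s0, s1):
--         if a != b:
--             return "time 1" if a else "time 2"
--     return "empate"
-- ===== Notes on version B (the rewrite author's own statement) =====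
-- stated objective: alternative
-- what changed: A decides with one fused pass maintaining scores plus running tie-break flags; B computes the two per-position match vectors and their totals, decides on totals, and on a tie scans for the first position where the match vectors differ (the team that led first).
import Mathlib
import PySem

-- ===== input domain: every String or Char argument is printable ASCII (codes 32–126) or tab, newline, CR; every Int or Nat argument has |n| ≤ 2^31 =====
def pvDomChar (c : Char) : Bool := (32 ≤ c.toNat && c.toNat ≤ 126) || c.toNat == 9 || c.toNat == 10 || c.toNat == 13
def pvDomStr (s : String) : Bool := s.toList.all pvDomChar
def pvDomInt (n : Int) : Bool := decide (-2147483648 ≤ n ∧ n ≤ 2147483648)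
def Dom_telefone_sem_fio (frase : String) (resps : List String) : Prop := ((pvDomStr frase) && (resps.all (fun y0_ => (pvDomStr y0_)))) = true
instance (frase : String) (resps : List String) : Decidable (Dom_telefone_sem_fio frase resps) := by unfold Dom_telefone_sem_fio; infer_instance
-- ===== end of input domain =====

-- B re-decomposes A's fused score-and-flag pass into totals plus a first-divergence tie-break scan;
-- equivalence is proved on inputs where the Python returns (Pre_ excludes only IndexError inputs).

-- shared helper: 'frase[x] == resps[i][x]'; the .getD totalizations are exact whenever the indices
-- are in range, which Pre_ guarantees (Python raises IndexError exactly where pyGet? is none)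
def pvMatch (frase : String) (resps : List String) (i : Int) (x : Int) : Bool :=
  ((PySem.Str.pyGet? frase x).getD ' ') ==
    ((PySem.Str.pyGet? (PySem.List.pyGetD resps i "") x).getD ' ')

-- ===== PORT A =====
def telefone_sem_fio (frase : String) (resps : List String) : String :=
  let fin := (PySem.List.pyRange 0 (PySem.Str.len frase) 1).foldl
    (fun st x =>
      let p0 := st.1 + (if pvMatch frase resps 0 x then (1 : Int) else 0)
      let p1 := st.2.1 + (if pvMatch frase resps 1 x then (1 : Int) else 0)
      let d0 := st.2.2.1
      let d1 := st.2.2.2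
      if d0 == d1 then
        if p0 > p1 then (p0, p1, d0, false)
        else if p0 < p1 then (p0, p1, false, d1)
        else (p0, p1, d0, d1)
      else (p0, p1, d0, d1))
    ((0 : Int), (0 : Int), true, true)
  if fin.1 == fin.2.1 then
    if fin.2.2.1 == fin.2.2.2 then "empate"
    else if fin.2.2.1 then "time 1"
    else "time 2"
  else if fin.1 > fin.2.1 then "time 1"
  else "time 2"

-- ===== PORT B =====
-- 'for a, b in zip(s0, s1): if a != b: return …' / final 'return "empate"'
def pvScan : List (Bool × Bool) → String
  | [] => "empate"
  | (a, b) :: t => if a != b then (if a then "time 1" else "time 2") else pvScan t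

def telefone_sem_fio_alt (frase : String) (resps : List String) : String :=
  let s0 := (PySem.List.pyRange 0 (PySem.Str.len frase) 1).map (fun x => pvMatch frase resps 0 x)
  let s1 := (PySem.List.pyRange 0 (PySem.Str.len frase) 1).map (fun x => pvMatch frase resps 1 x)
  let p0 := s0.foldl (fun a b => a + (if b then (1 : Int) else 0)) (0 : Int)
  let p1 := s1.foldl (fun a b => a + (if b then (1 : Int) else 0)) (0 : Int)
  if p0 != p1 then (if p0 > p1 then "time 1" else "time 2")
  else pvScan (s0.zip s1)

-- ===== PRECONDITION & SPEC =====
-- Pre_ excludes exactly the inputs where Python A raises IndexError: a nonempty frase with fewer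
-- than two answers, or an answer shorter than frase.
def Pre_telefone_sem_fio (frase : String) (resps : List String) : Prop :=
  frase.toList.length = 0 ∨
    (2 ≤ resps.length ∧
      frase.toList.length ≤ (resps.getD 0 "").toList.length ∧
      frase.toList.length ≤ (resps.getD 1 "").toList.length)
instance (frase : String) (resps : List String) : Decidable (Pre_telefone_sem_fio frase resps) := by
  unfold Pre_telefone_sem_fio; infer_instance

def pvWitness_telefone_sem_fio : String × List String := ("ab", ["ab", "ba"])

def Spec_telefone_sem_fio (frase : String) (resps : List String) (out : String) : Prop := out = telefone_sem_fio_alt frase resps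
instance (frase : String) (resps : List String) (out : String) : Decidable (Spec_telefone_sem_fio frase resps out) := by unfold Spec_telefone_sem_fio; infer_instance

-- ===== CLAIM (what is proved, stated in full; the proofs are below) =====
def Claim_equal_telefone_sem_fio : Prop := ∀ (frase : String) (resps : List String), Dom_telefone_sem_fio frase resps → Pre_telefone_sem_fio frase resps → Spec_telefone_sem_fio frase resps (telefone_sem_fio frase resps)

-- ===== LEMMAS AND PROOFS =====

-- A's loop body, abstracted over the pair of per-position match bits
def pvStep (st : Int × Int × Bool × Bool) (ab : Bool × Bool) : Int × Int × Bool × Bool :=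
  let p0 := st.1 + (if ab.1 then (1 : Int) else 0)
  let p1 := st.2.1 + (if ab.2 then (1 : Int) else 0)
  let d0 := st.2.2.1
  let d1 := st.2.2.2
  if d0 == d1 then
    if p0 > p1 then (p0, p1, d0, false)
    else if p0 < p1 then (p0, p1, false, d1)
    else (p0, p1, d0, d1)
  else (p0, p1, d0, d1)

def pvCnt0 : List (Bool × Bool) → Int
  | [] => 0
  | ab :: t => (if ab.1 then 1 else 0) + pvCnt0 t

def pvCnt1 : List (Bool × Bool) → Int
  | [] => 0
  | ab :: t => (if ab.2 then 1 else 0) + pvCnt1 t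

theorem pvFoldl_cnt0 (L : List (Bool × Bool)) (p : Int) :
    (L.map Prod.fst).foldl (fun a b => a + (if b then (1 : Int) else 0)) p = p + pvCnt0 L := by
  induction L generalizing p with
  | nil => simp [pvCnt0]
  | cons ab t ih => simp [pvCnt0, ih]; ring

theorem pvFoldl_cnt1 (L : List (Bool × Bool)) (p : Int) :
    (L.map Prod.snd).foldl (fun a b => a + (if b then (1 : Int) else 0)) p = p + pvCnt1 L := by
  induction L generalizing p with
  | nil => simp [pvCnt1]
  | cons ab t ih => simp [pvCnt1, ih]; ring

-- once the flags differ A's loop only accumulates the scores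
theorem pvFold_frozen (L : List (Bool × Bool)) (p0 p1 : Int) (d0 d1 : Bool) (h : d0 ≠ d1) :
    L.foldl pvStep (p0, p1, d0, d1) = (p0 + pvCnt0 L, p1 + pvCnt1 L, d0, d1) := by
  induction L generalizing p0 p1 with
  | nil => simp [pvCnt0, pvCnt1]
  | cons ab t ih =>
      have hd : (d0 == d1) = false := by cases d0 <;> cases d1 <;> simp_all
      simp only [List.foldl_cons, pvStep, hd, Bool.false_eq_true, if_false, ih, pvCnt0, pvCnt1]
      simp [add_assoc]

-- A's decision from an arbitrary common starting score equals B's totals-then-scan decision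
theorem pvKey (L : List (Bool × Bool)) (p : Int) :
    (let fin := L.foldl pvStep (p, p, true, true)
     if fin.1 == fin.2.1 then
       if fin.2.2.1 == fin.2.2.2 then "empate"
       else if fin.2.2.1 then "time 1"
       else "time 2"
     else if fin.1 > fin.2.1 then "time 1"
     else "time 2") =
    (if (p + pvCnt0 L) != (p + pvCnt1 L) then
       (if (p + pvCnt0 L) > (p + pvCnt1 L) then "time 1" else "time 2")
     else pvScan L) := by
  induction L generalizing p with
  | nil => simp [pvCnt0, pvCnt1, pvScan]
  | cons ab t ih =>
      obtain ⟨a, b⟩ := ab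
      cases a <;> cases b
      · -- (false, false)
        simpa [pvStep, pvCnt0, pvCnt1, pvScan, add_assoc] using ih p
      · -- (false, true): team 2 leads first
        have hf := pvFold_frozen t p (p + 1) false true (by simp)
        simp only [List.foldl_cons, pvStep, pvCnt0, pvCnt1, pvScan]
        norm_num [hf]
        split_ifs <;> first | rfl | omega
      · -- (true, false): team 1 leads first
        have hf := pvFold_frozen t (p + 1) p true false (by simp)
        simp only [List.foldl_cons, pvStep, pvCnt0, pvCnt1, pvScan]
        norm_num [hf]
        split_ifs <;> first | rfl | omega
      · -- (true, true)
        simpa [pvStep, pvCnt0, pvCnt1, pvScan, add_assoc] using ih (p + 1)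

-- ===== VERDICT (by name: the statement is the Claim_ definition above) =====
theorem telefone_sem_fio_spec : Claim_equal_telefone_sem_fio := by
  intro frase resps _ _
  unfold Spec_telefone_sem_fio telefone_sem_fio telefone_sem_fio_alt
  set Lx := PySem.List.pyRange 0 (PySem.Str.len frase) 1 with hLx
  set g : Int → Bool × Bool := fun x => (pvMatch frase resps 0 x, pvMatch frase resps 1 x) with hg
  have hA : Lx.foldl
      (fun st x =>
        let p0 := st.1 + (if pvMatch frase resps 0 x then (1 : Int) else 0)
        let p1 := st.2.1 + (if pvMatch frase resps 1 x then (1 : Int) else 0)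
        let d0 := st.2.2.1
        let d1 := st.2.2.2
        if d0 == d1 then
          if p0 > p1 then (p0, p1, d0, false)
          else if p0 < p1 then (p0, p1, false, d1)
          else (p0, p1, d0, d1)
        else (p0, p1, d0, d1)) ((0 : Int), (0 : Int), true, true) =
      (Lx.map g).foldl pvStep ((0 : Int), (0 : Int), true, true) := by
    rw [List.foldl_map]
    rfl
  have hs0 : Lx.map (fun x => pvMatch frase resps 0 x) = (Lx.map g).map Prod.fst := by
    rw [List.map_map]
    rfl
  have hs1 : Lx.map (fun x => pvMatch frase resps 1 x) = (Lx.map g).map Prod.snd := by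
    rw [List.map_map]
    rfl
  have hzip : ((Lx.map g).map Prod.fst).zip ((Lx.map g).map Prod.snd) = Lx.map g := by
    rw [List.zip_map']
    simp
  simp only [hA, hs0, hs1, pvFoldl_cnt0, pvFoldl_cnt1, hzip, zero_add]
  have := pvKey (Lx.map g) 0
  simpa using this
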